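-- pv_equiv track=rewrite | github.com/MALHI786/Vedio_to_Refined_text | utils/audio_chunker.py | combine_transcriptions
-- ===== SOURCE A (Python) =====
-- from typing import List, Tuple, Optional
--
-- def combine_transcriptions(
--     transcriptions: List[str],
--     overlap_words: int = 10
-- ) -> str:
--     """
--     Combine transcriptions from multiple chunks.
--     Handles overlapping text between chunks.
--
--     Args:
--         transcriptions: List of transcribed texts from each chunk
--         overlap_words: Number of words to check for overlap
--
--     Returns:
--         Combined text
--     """
--     if not transcriptions:
--         return ""
--
--     if len(transcriptions) == 1:
--         return transcriptions[0]
--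
--     combined = transcriptions[0]
--
--     for i in range(1, len(transcriptions)):
--         current = transcriptions[i]
--
--         if not current.strip():
--             continue
--
--         # Try to find overlap
--         combined_words = combined.split()
--         current_words = current.split()
--
--         if len(combined_words) < overlap_words or len(current_words) < overlap_words:
--             # Not enough words to check overlap, just append
--             combined = combined.rstrip() + " " + current.lstrip()
--             continue
--
--         # Look for overlap in the last N words of combined and first N words of current
--         overlap_found = False
--         for j in range(min(overlap_words, len(combined_words))):
--             # Get last j+1 words from combined
--             last_words = " ".join(combined_words[-(j+1):]).lower()
--
--             # Check if they appear at the start of current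
--             for k in range(min(overlap_words, len(current_words))):
--                 first_words = " ".join(current_words[:k+1]).lower()
--
--                 if last_words == first_words:
--                     # Found overlap, skip the overlapping part
--                     combined = combined.rstrip() + " " + " ".join(current_words[k+1:])
--                     overlap_found = True
--                     break
--
--             if overlap_found:
--                 break
--
--         if not overlap_found:
--             # No overlap found, just append with space
--             combined = combined.rstrip() + " " + current.lstrip()
--
--     # Clean up extra spaces
--     combined = " ".join(combined.split())
--
--     return combined
-- ===== SOURCE B (Python) =====
-- def combine_transcriptions(transcriptions, overlap_words=10):
--     # Key fact: words from .split() are nonempty and whitespace-free, so two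
--     # space-joined word sequences are equal iff the word LISTS are equal.
--     # Hence A's nested (suffix j, prefix k) join-and-compare scan can only ever
--     # match on the diagonal k == j, and the whole overlap search collapses to a
--     # single loop comparing lowercased word-list slices of one length.
--     if not transcriptions:
--         return ""
--     if len(transcriptions) == 1:
--         return transcriptions[0]
--
--     combined = transcriptions[0]
--
--     for current in transcriptions[1:]:
--         if not current.strip():
--             continue
--
--         combined_words = combined.split()
--         current_words = current.split()
--
--         if len(combined_words) < overlap_words or len(current_words) < overlap_words:
--             combined = combined.rstrip() + " " + current.lstrip()
--             continue
--
--         # Here both lists have >= overlap_words words, so both of A's range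
--         # bounds equal overlap_words; lowercase just the two candidate windows
--         # and compare word-list slices directly.
--         lc = [w.lower() for w in combined_words[len(combined_words) - overlap_words:]]
--         lw = [w.lower() for w in current_words[:overlap_words]]
--         for j in range(overlap_words):
--             if lc[len(lc) - (j + 1):] == lw[:j + 1]:
--                 combined = combined.rstrip() + " " + " ".join(current_words[j + 1:])
--                 break
--         else:
--             combined = combined.rstrip() + " " + current.lstrip()
--
--     return " ".join(combined.split())
-- ===== Notes on version B (the rewrite author's own statement) =====
-- stated objective: alternative
-- what changed: A's nested (suffix j, prefix k) scan that re-joins and compares strings for every pair is replaced by a single loop over one slice length: since split() words are nonempty and whitespace-free, space-joined word sequences are equal iff the word lists are equal, so a match is only possible at k = j, and B precomputes the lowercased word lists once and compares list slices on the diagonal.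
import Mathlib
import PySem

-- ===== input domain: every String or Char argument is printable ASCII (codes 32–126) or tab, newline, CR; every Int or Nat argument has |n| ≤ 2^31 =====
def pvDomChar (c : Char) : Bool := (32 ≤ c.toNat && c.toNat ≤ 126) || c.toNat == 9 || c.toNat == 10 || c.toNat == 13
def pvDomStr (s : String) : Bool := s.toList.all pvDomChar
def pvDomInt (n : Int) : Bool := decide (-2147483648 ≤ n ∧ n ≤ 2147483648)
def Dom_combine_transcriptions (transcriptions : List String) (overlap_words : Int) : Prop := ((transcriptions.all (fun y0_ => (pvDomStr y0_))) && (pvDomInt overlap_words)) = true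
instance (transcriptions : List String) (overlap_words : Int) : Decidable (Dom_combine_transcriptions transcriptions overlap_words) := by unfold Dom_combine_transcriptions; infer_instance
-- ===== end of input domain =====

-- B replaces A's nested (suffix j, prefix k) join-and-compare scan by a single loop
-- comparing lowercased word-LIST slices of one length: space-joined word sequences are
-- equal iff the word lists are (words are nonempty and whitespace-free), so A's inner
-- scan can only ever match on the diagonal k = j.


-- ===== PORT A =====
-- inner 'for k in range(min(overlap_words, len(current_words)))' loop with break:
-- returns the first k with " ".join(current_words[:k+1]).lower() == last_words.
-- current_words[:k+1] = cw.take (k+1) exactly (k+1 ≥ 0).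
def kLoopA (cw : List String) (mk : Nat) (lastWords : String) (k : Nat) : Option Nat :=
  if _h : k < mk then
    if PySem.Str.lower (PySem.Str.join " " (cw.take (k+1))) = lastWords then some k
    else kLoopA cw mk lastWords (k+1)
  else none
termination_by mk - k

-- outer 'for j in range(min(overlap_words, len(combined_words)))' loop with the
-- overlap_found flag/break: some = the new combined text, none = no overlap found.
-- combined_words[-(j+1):] = cbw.drop (cbw.length - (j+1)) exactly since 1 ≤ j+1 ≤ cbw.length here.
def jLoopA (combined : String) (cbw cw : List String) (mj mk : Nat) (j : Nat) : Option String :=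
  if _h : j < mj then
    match kLoopA cw mk (PySem.Str.lower (PySem.Str.join " " (cbw.drop (cbw.length - (j+1))))) 0 with
    | some k => some (PySem.Str.rstrip combined ++ " " ++ PySem.Str.join " " (cw.drop (k+1)))
    | none => jLoopA combined cbw cw mj mk (j+1)
  else none
termination_by mj - j

-- one iteration of A's 'for i in range(1, len(transcriptions))' body
def stepA (overlap_words : Int) (combined current : String) : String :=
  if PySem.Str.strip current = "" then combined
  else
    let combined_words := PySem.Str.split₀ combined
    let current_words := PySem.Str.split₀ current
    if (combined_words.length : Int) < overlap_words ∨ (current_words.length : Int) < overlap_words then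
      PySem.Str.rstrip combined ++ " " ++ PySem.Str.lstrip current
    else
      match jLoopA combined combined_words current_words
          (min overlap_words (combined_words.length : Int)).toNat
          (min overlap_words (current_words.length : Int)).toNat 0 with
      | some c => c
      | none => PySem.Str.rstrip combined ++ " " ++ PySem.Str.lstrip current

def combine_transcriptions (transcriptions : List String) (overlap_words : Int) : String :=
  match transcriptions with
  | [] => ""
  | [t] => t
  | t :: rest =>
    PySem.Str.join " " (PySem.Str.split₀ (rest.foldl (stepA overlap_words) t))

-- ===== PORT B =====
-- B's single 'for j in range(overlap_words)' loop with break/else: compare the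
-- lowercased word-list slices lc[len(lc)-(j+1):] and lw[:j+1]; some j = matched length.
-- lc[len(lc)-(j+1):] = lc.drop (lc.length - (j+1)) exactly since j+1 ≤ lc.length here.
def jLoopB (lc lw : List String) (mj j : Nat) : Option Nat :=
  if _h : j < mj then
    if lc.drop (lc.length - (j+1)) = lw.take (j+1) then some j
    else jLoopB lc lw mj (j+1)
  else none
termination_by mj - j

-- one iteration of B's 'for current in transcriptions[1:]' body
def stepB (overlap_words : Int) (combined current : String) : String :=
  if PySem.Str.strip current = "" then combined
  else
    let combined_words := PySem.Str.split₀ combined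
    let current_words := PySem.Str.split₀ current
    if (combined_words.length : Int) < overlap_words ∨ (current_words.length : Int) < overlap_words then
      PySem.Str.rstrip combined ++ " " ++ PySem.Str.lstrip current
    else
      -- combined_words[len(combined_words) - overlap_words:] and current_words[:overlap_words]
      let lc := (PySem.List.slice combined_words (some ((combined_words.length : Int) - overlap_words)) none).map PySem.Str.lower
      let lw := (PySem.List.slice current_words none (some overlap_words)).map PySem.Str.lower
      match jLoopB lc lw overlap_words.toNat 0 with
      | some j => PySem.Str.rstrip combined ++ " " ++ PySem.Str.join " " (current_words.drop (j+1))
      | none => PySem.Str.rstrip combined ++ " " ++ PySem.Str.lstrip current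

def combine_transcriptions_alt (transcriptions : List String) (overlap_words : Int) : String :=
  if transcriptions.length = 0 then ""
  else if transcriptions.length = 1 then transcriptions.headD ""
  else
    PySem.Str.join " "
      (PySem.Str.split₀ ((transcriptions.drop 1).foldl (stepB overlap_words) (transcriptions.headD "")))

-- ===== PRECONDITION & SPEC =====
def Spec_combine_transcriptions (transcriptions : List String) (overlap_words : Int) (out : String) : Prop := out = combine_transcriptions_alt transcriptions overlap_words
instance (transcriptions : List String) (overlap_words : Int) (out : String) : Decidable (Spec_combine_transcriptions transcriptions overlap_words out) := by unfold Spec_combine_transcriptions; infer_instance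

-- ===== CLAIM (what is proved, stated in full; the proofs are below) =====
def Claim_equal_combine_transcriptions : Prop := ∀ (transcriptions : List String) (overlap_words : Int), Dom_combine_transcriptions transcriptions overlap_words → Spec_combine_transcriptions transcriptions overlap_words (combine_transcriptions transcriptions overlap_words)

-- ===== LEMMAS AND PROOFS =====

-- the words of a list are nonempty and whitespace-free (true of any .split() output)
def WordyWords (u : List String) : Prop :=
  ∀ w ∈ u, w.toList ≠ [] ∧ ∀ c ∈ w.toList, PySem.Chars.isspace c = false

-- lowering a non-whitespace char never yields a space
theorem lowerChar_ne_space (c : Char) (h : PySem.Chars.isspace c = false) :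
    PySem.Chars.lowerChar c ≠ ' ' := by
  unfold PySem.Chars.lowerChar
  split
  · rename_i hu
    unfold PySem.Chars.isupper at hu
    simp only [decide_eq_true_eq, Bool.and_eq_true] at hu
    have h1 : 65 ≤ c.toNat := by rw [Char.le_def] at hu; exact hu.1
    have h2 : c.toNat ≤ 90 := by rw [Char.le_def] at hu; exact hu.2
    intro hc
    have h3 := congrArg Char.toNat hc
    rw [Char.toNat_ofNat, if_pos (by left; omega)] at h3
    have h4 : (' ').toNat = 32 := by decide
    omega
  · intro hc; subst hc
    exact absurd h (by decide)

-- cutting two space-free segments at their first explicit space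
theorem seg_inj (a : List Char) : ∀ (b ra rb : List Char), ' ' ∉ a → ' ' ∉ b →
    a ++ ' ' :: ra = b ++ ' ' :: rb → a = b ∧ ra = rb := by
  induction a with
  | nil =>
    intro b ra rb _ hb h
    cases b with
    | nil => simpa using h
    | cons d b' =>
      simp only [List.nil_append, List.cons_append, List.cons.injEq] at h
      exact absurd (h.1 ▸ List.mem_cons_self) hb
  | cons c a' ih =>
    intro b ra rb ha hb h
    cases b with
    | nil =>
      simp only [List.cons_append, List.nil_append, List.cons.injEq] at h
      exact absurd (h.1 ▸ List.mem_cons_self) ha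
    | cons d b' =>
      simp only [List.cons_append, List.cons.injEq] at h
      obtain ⟨rfl, h'⟩ := h
      obtain ⟨h1, h2⟩ := ih b' ra rb (fun hm => ha (List.mem_cons_of_mem _ hm))
        (fun hm => hb (List.mem_cons_of_mem _ hm)) h'
      exact ⟨by rw [h1], h2⟩

theorem join_ne_nil (w : List Char) (vs : List (List Char)) (hw : w ≠ []) :
    PySem.Chars.join [' '] (w :: vs) ≠ [] := by
  cases vs with
  | nil => rw [PySem.Chars.join_singleton]; exact hw
  | cons x xs =>
    rw [PySem.Chars.join_cons_cons]
    intro h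
    exact hw (List.append_eq_nil_iff.mp (List.append_eq_nil_iff.mp h).1).1

-- space-join is injective on lists of nonempty space-free words
theorem join_space_inj (u : List (List Char)) : ∀ (v : List (List Char)),
    (∀ w ∈ u, w ≠ [] ∧ ' ' ∉ w) → (∀ w ∈ v, w ≠ [] ∧ ' ' ∉ w) →
    PySem.Chars.join [' '] u = PySem.Chars.join [' '] v → u = v := by
  induction u with
  | nil =>
    intro v _ hv h
    cases v with
    | nil => rfl
    | cons x vs =>
      rw [PySem.Chars.join_nil] at h
      exact absurd h.symm (join_ne_nil x vs (hv x List.mem_cons_self).1)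
  | cons w us ih =>
    intro v hu hv h
    cases v with
    | nil =>
      rw [PySem.Chars.join_nil] at h
      exact absurd h (join_ne_nil w us (hu w List.mem_cons_self).1)
    | cons x vs =>
      cases us with
      | nil =>
        cases vs with
        | nil =>
          rw [PySem.Chars.join_singleton, PySem.Chars.join_singleton] at h
          rw [h]
        | cons x2 vs' =>
          rw [PySem.Chars.join_singleton, PySem.Chars.join_cons_cons] at h
          have : ' ' ∈ w := by
            rw [h]
            exact List.mem_append_left _ (List.mem_append_right _ List.mem_cons_self)
          exact absurd this (hu w List.mem_cons_self).2
      | cons u2 us' =>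
        cases vs with
        | nil =>
          rw [PySem.Chars.join_singleton, PySem.Chars.join_cons_cons] at h
          have : ' ' ∈ x := by
            rw [← h]
            exact List.mem_append_left _ (List.mem_append_right _ List.mem_cons_self)
          exact absurd this (hv x List.mem_cons_self).2
        | cons v2 vs' =>
          rw [PySem.Chars.join_cons_cons, PySem.Chars.join_cons_cons,
            List.append_assoc, List.append_assoc] at h
          simp only [List.singleton_append] at h
          obtain ⟨h1, h2⟩ := seg_inj w x _ _ (hu w List.mem_cons_self).2
            (hv x List.mem_cons_self).2 h
          have h3 := ih (v2 :: vs') (fun w hw => hu w (List.mem_cons_of_mem _ hw))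
            (fun w hw => hv w (List.mem_cons_of_mem _ hw)) h2
          rw [h1, h3]

-- lowering commutes with space-join (lowerChar fixes ' ')
theorem lower_join (u : List (List Char)) :
    PySem.Chars.lower (PySem.Chars.join [' '] u) =
    PySem.Chars.join [' '] (u.map PySem.Chars.lower) := by
  induction u with
  | nil => rfl
  | cons w us ih =>
    cases us with
    | nil => simp [PySem.Chars.join_singleton]
    | cons x vs =>
      rw [List.map_cons, PySem.Chars.join_cons_cons]
      rw [show (x :: vs).map PySem.Chars.lower = PySem.Chars.lower x :: vs.map PySem.Chars.lower from rfl,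
        PySem.Chars.join_cons_cons]
      rw [← List.map_cons, ← ih]
      unfold PySem.Chars.lower
      rw [List.map_append, List.map_append]
      rfl

theorem wordy_lower (u : List String) (hu : WordyWords u) :
    ∀ w ∈ (u.map String.toList).map PySem.Chars.lower, w ≠ [] ∧ ' ' ∉ w := by
  intro w hw
  simp only [List.map_map, List.mem_map, Function.comp] at hw
  obtain ⟨x, hx, rfl⟩ := hw
  obtain ⟨h1, h2⟩ := hu x hx
  constructor
  · unfold PySem.Chars.lower; simpa using h1
  · unfold PySem.Chars.lower
    intro hm
    obtain ⟨c, hc, hcs⟩ := List.mem_map.mp hm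
    exact lowerChar_ne_space c (h2 c hc) hcs

-- the central fact: lowered space-joins of wordy lists are equal iff the
-- lists of lowered words are equal
theorem lower_join_eq_iff (u v : List String) (hu : WordyWords u) (hv : WordyWords v) :
    (PySem.Str.lower (PySem.Str.join " " u) = PySem.Str.lower (PySem.Str.join " " v)) ↔
    u.map PySem.Str.lower = v.map PySem.Str.lower := by
  have hrepr : ∀ (w : List String),
      PySem.Str.lower (PySem.Str.join " " w) =
      String.ofList (PySem.Chars.join [' '] ((w.map String.toList).map PySem.Chars.lower)) := by
    intro w
    show String.ofList (PySem.Chars.lower (String.ofList (PySem.Chars.join ((" ").toList) (w.map String.toList))).toList) = _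
    rw [String.toList_ofList, show (" ").toList = [' '] from rfl, lower_join]
  have hmaps : ∀ (w : List String),
      w.map PySem.Str.lower = ((w.map String.toList).map PySem.Chars.lower).map String.ofList := by
    intro w
    simp only [List.map_map]
    rfl
  rw [hrepr, hrepr, hmaps u, hmaps v]
  constructor
  · intro h
    have h2 : PySem.Chars.join [' '] ((u.map String.toList).map PySem.Chars.lower) =
        PySem.Chars.join [' '] ((v.map String.toList).map PySem.Chars.lower) := by
      have := congrArg String.toList h
      rwa [String.toList_ofList, String.toList_ofList] at this
    rw [join_space_inj _ _ (wordy_lower u hu) (wordy_lower v hv) h2]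
  · intro h
    have h2 : (u.map String.toList).map PySem.Chars.lower =
        (v.map String.toList).map PySem.Chars.lower := by
      have := congrArg (List.map String.toList) h
      simpa [List.map_map, Function.comp_def, String.toList_ofList] using this
    rw [h2]

-- the words produced by Chars.split₀ are nonempty and whitespace-free
theorem split₀_go_wordy (rest : List Char) : ∀ (cur : List Char) (acc : List (List Char)),
    (∀ c ∈ cur, PySem.Chars.isspace c = false) →
    (∀ w ∈ acc, w ≠ [] ∧ ∀ c ∈ w, PySem.Chars.isspace c = false) →
    ∀ w ∈ PySem.Chars.split₀.go rest cur acc, w ≠ [] ∧ ∀ c ∈ w, PySem.Chars.isspace c = false := by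
  induction rest with
  | nil =>
    intro cur acc hcur hacc w hw
    unfold PySem.Chars.split₀.go at hw
    split at hw
    · exact hacc w (List.mem_reverse.mp hw)
    · rename_i hne
      rw [List.mem_reverse] at hw
      cases hw with
      | head =>
        refine ⟨by simpa using (by simpa [List.isEmpty_iff] using hne), ?_⟩
        intro c hc
        exact hcur c (List.mem_reverse.mp hc)
      | tail _ hw' => exact hacc w hw'
  | cons c r ih =>
    intro cur acc hcur hacc w hw
    unfold PySem.Chars.split₀.go at hw
    split at hw
    · split at hw
      · exact ih [] acc (by simp) hacc w hw
      · rename_i hne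
        refine ih [] (cur.reverse :: acc) (by simp) ?_ w hw
        intro v hv
        cases hv with
        | head =>
          refine ⟨by simpa using (by simpa [List.isEmpty_iff] using hne), ?_⟩
          intro d hd
          exact hcur d (List.mem_reverse.mp hd)
        | tail _ hv' => exact hacc v hv'
    · rename_i hcs
      refine ih (c :: cur) acc ?_ hacc w hw
      intro d hd
      cases hd with
      | head => simpa using hcs
      | tail _ hd' => exact hcur d hd'

theorem split₀_wordy (s : String) : WordyWords (PySem.Str.split₀ s) := by
  intro w hw
  have : PySem.Str.split₀ s = (PySem.Chars.split₀ s.toList).map String.ofList := rfl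
  rw [this, List.mem_map] at hw
  obtain ⟨u, hu, rfl⟩ := hw
  rw [String.toList_ofList]
  exact split₀_go_wordy s.toList [] [] (by simp) (by simp) u hu

theorem wordy_sub (u v : List String) (h : WordyWords v) (hsub : ∀ w ∈ u, w ∈ v) :
    WordyWords u := fun w hw => h w (hsub w hw)

-- A's inner condition at k can hold only for k = j, and then exactly when the
-- lowered word-list slices agree
theorem condA_iff (cw cbw : List String) (hcw : WordyWords cw) (hcbw : WordyWords cbw)
    (j k : Nat) (hk : k + 1 ≤ cw.length) (hj : j + 1 ≤ cbw.length) :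
    (PySem.Str.lower (PySem.Str.join " " (cw.take (k+1))) =
      PySem.Str.lower (PySem.Str.join " " (cbw.drop (cbw.length - (j+1))))) ↔
    (k = j ∧ (cbw.map PySem.Str.lower).drop (cbw.length - (j+1)) =
      (cw.map PySem.Str.lower).take (j+1)) := by
  rw [lower_join_eq_iff _ _ (wordy_sub _ cw hcw (fun w hw => List.mem_of_mem_take hw))
    (wordy_sub _ cbw hcbw (fun w hw => List.mem_of_mem_drop hw))]
  rw [List.map_take, List.map_drop]
  constructor
  · intro h
    have hlen := congrArg List.length h
    rw [List.length_take, List.length_drop, List.length_map, List.length_map] at hlen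
    have hkj : k = j := by omega
    subst hkj
    exact ⟨rfl, h.symm⟩
  · rintro ⟨rfl, h⟩
    exact h.symm

-- the inner scan finds exactly the diagonal match
theorem kLoopA_hit (cw cbw : List String) (hcw : WordyWords cw) (hcbw : WordyWords cbw)
    (m j : Nat) (hm : m ≤ cw.length) (hj : j + 1 ≤ cbw.length) (hjm : j < m)
    (hC : (cbw.map PySem.Str.lower).drop (cbw.length - (j+1)) = (cw.map PySem.Str.lower).take (j+1)) :
    ∀ (n k0 : Nat), j ≤ k0 + n → k0 ≤ j →
    kLoopA cw m (PySem.Str.lower (PySem.Str.join " " (cbw.drop (cbw.length - (j+1))))) k0 = some j := by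
  intro n
  induction n with
  | zero =>
    intro k0 h1 h2
    have hk0 : k0 = j := by omega
    rw [hk0, kLoopA, dif_pos hjm,
      if_pos ((condA_iff cw cbw hcw hcbw j j (by omega) hj).mpr ⟨rfl, hC⟩)]
  | succ n ih =>
    intro k0 h1 h2
    by_cases hk0 : k0 = j
    · rw [hk0, kLoopA, dif_pos hjm,
        if_pos ((condA_iff cw cbw hcw hcbw j j (by omega) hj).mpr ⟨rfl, hC⟩)]
    · rw [kLoopA, dif_pos (by omega),
        if_neg (fun hc => hk0 ((condA_iff cw cbw hcw hcbw j k0 (by omega) hj).mp hc).1)]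
      exact ih (k0+1) (by omega) (by omega)

theorem kLoopA_miss (cw cbw : List String) (hcw : WordyWords cw) (hcbw : WordyWords cbw)
    (m j : Nat) (hm : m ≤ cw.length) (hj : j + 1 ≤ cbw.length)
    (hC : ¬ (cbw.map PySem.Str.lower).drop (cbw.length - (j+1)) = (cw.map PySem.Str.lower).take (j+1)) :
    ∀ (n k0 : Nat), m ≤ k0 + n →
    kLoopA cw m (PySem.Str.lower (PySem.Str.join " " (cbw.drop (cbw.length - (j+1))))) k0 = none := by
  intro n
  induction n with
  | zero =>
    intro k0 h1
    rw [kLoopA, dif_neg (by omega)]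
  | succ n ih =>
    intro k0 h1
    rw [kLoopA]
    by_cases hlt : k0 < m
    · rw [dif_pos hlt,
        if_neg (fun hc => hC ((condA_iff cw cbw hcw hcbw j k0 (by omega) hj).mp hc).2)]
      exact ih (k0+1) (by omega)
    · rw [dif_neg hlt]

theorem jLoopA_eq_jLoopB (combined : String) (cbw cw : List String)
    (hcbw : WordyWords cbw) (hcw : WordyWords cw) (m : Nat)
    (hmc : m ≤ cbw.length) (hmw : m ≤ cw.length) :
    ∀ (n j : Nat), m ≤ j + n →
    jLoopA combined cbw cw m m j =
    (jLoopB (cbw.map PySem.Str.lower) (cw.map PySem.Str.lower) m j).map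
      (fun k => PySem.Str.rstrip combined ++ " " ++ PySem.Str.join " " (cw.drop (k+1))) := by
  intro n
  induction n with
  | zero =>
    intro j hj
    rw [jLoopA, jLoopB, dif_neg (by omega), dif_neg (by omega)]
    rfl
  | succ n ih =>
    intro j hj
    rw [jLoopA, jLoopB]
    by_cases h : j < m
    · rw [dif_pos h, dif_pos h]
      simp only [List.length_map]
      by_cases hC : (cbw.map PySem.Str.lower).drop (cbw.length - (j+1)) =
          (cw.map PySem.Str.lower).take (j+1)
      · rw [kLoopA_hit cw cbw hcw hcbw m j hmw (by omega) h hC j 0 (by omega) (by omega)]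
        rw [if_pos (by rw [← List.map_drop, ← List.map_take] at hC ⊢; exact hC)]
        rfl
      · rw [kLoopA_miss cw cbw hcw hcbw m j hmw (by omega) hC m 0 (by omega)]
        rw [if_neg (by rw [← List.map_drop, ← List.map_take] at hC ⊢; exact hC)]
        exact ih (j+1) (by omega)
    · rw [dif_neg h, dif_neg h]
      rfl

-- running B's loop on the length-m windows is the same as on the full lists
theorem jLoopB_window (lc lw : List String) (m : Nat) (hmL : m ≤ lc.length) :
    ∀ (n j : Nat), m ≤ j + n →
    jLoopB (lc.drop (lc.length - m)) (lw.take m) m j = jLoopB lc lw m j := by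
  intro n
  induction n with
  | zero =>
    intro j hj
    unfold jLoopB
    rw [dif_neg (show ¬ j < m by omega), dif_neg (show ¬ j < m by omega)]
  | succ n ih =>
    intro j hj
    unfold jLoopB
    by_cases h : j < m
    · rw [dif_pos h, dif_pos h]
      have hlen : (lc.drop (lc.length - m)).length = m := by
        rw [List.length_drop]; omega
      rw [hlen, List.drop_drop, List.take_take,
        show lc.length - m + (m - (j+1)) = lc.length - (j+1) by omega,
        show min (j+1) m = j+1 by omega]
      by_cases hC : lc.drop (lc.length - (j+1)) = lw.take (j+1)
      · rw [if_pos hC, if_pos hC]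
      · rw [if_neg hC, if_neg hC]
        exact ih (j+1) (by omega)
    · rw [dif_neg h, dif_neg h]

theorem stepB_eq_stepA (overlap_words : Int) : stepB overlap_words = stepA overlap_words := by
  funext combined current
  simp only [stepB, stepA]
  by_cases h1 : PySem.Str.strip current = ""
  · rw [if_pos h1, if_pos h1]
  · rw [if_neg h1, if_neg h1]
    by_cases h2 : ((PySem.Str.split₀ combined).length : Int) < overlap_words ∨
        ((PySem.Str.split₀ current).length : Int) < overlap_words
    · rw [if_pos h2, if_pos h2]
    · rw [if_neg h2, if_neg h2]
      have hc : overlap_words ≤ ((PySem.Str.split₀ combined).length : Int) :=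
        not_lt.mp (fun h => h2 (Or.inl h))
      have hw : overlap_words ≤ ((PySem.Str.split₀ current).length : Int) :=
        not_lt.mp (fun h => h2 (Or.inr h))
      have hmin1 : min overlap_words ((PySem.Str.split₀ combined).length : Int) = overlap_words :=
        min_eq_left hc
      have hmin2 : min overlap_words ((PySem.Str.split₀ current).length : Int) = overlap_words :=
        min_eq_left hw
      rw [hmin1, hmin2]
      have hmc : overlap_words.toNat ≤ (PySem.Str.split₀ combined).length := by omega
      have hmw : overlap_words.toNat ≤ (PySem.Str.split₀ current).length := by omega
      rw [jLoopA_eq_jLoopB combined (PySem.Str.split₀ combined) (PySem.Str.split₀ current)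
        (split₀_wordy combined) (split₀_wordy current) overlap_words.toNat hmc hmw
        overlap_words.toNat 0 (by omega)]
      by_cases how : 0 ≤ overlap_words
      · -- the two slices are exactly the drop/take windows here
        rw [PySem.List.slice_from _ (by omega), PySem.List.slice_to _ how,
          show ((((PySem.Str.split₀ combined).length : Int) - overlap_words)).toNat =
            (PySem.Str.split₀ combined).length - overlap_words.toNat by omega,
          List.map_drop, List.map_take]
        rw [show (PySem.Str.split₀ combined).length - overlap_words.toNat =
            ((PySem.Str.split₀ combined).map PySem.Str.lower).length - overlap_words.toNat by
          rw [List.length_map]]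
        rw [jLoopB_window _ _ overlap_words.toNat (by rw [List.length_map]; omega)
          overlap_words.toNat 0 (by omega)]
        cases jLoopB ((PySem.Str.split₀ combined).map PySem.Str.lower)
            ((PySem.Str.split₀ current).map PySem.Str.lower) overlap_words.toNat 0 with
        | none => rfl
        | some j => rfl
      · -- overlap_words < 0: both loops are over range(overlap_words) = empty
        have hm0 : overlap_words.toNat = 0 := by omega
        rw [hm0]
        unfold jLoopB
        rw [dif_neg (show ¬ (0:ℕ) < 0 by omega), dif_neg (show ¬ (0:ℕ) < 0 by omega)]
        rfl

-- ===== VERDICT (by name: the statement is the Claim_ definition above) =====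
theorem combine_transcriptions_spec : Claim_equal_combine_transcriptions := by
  intro transcriptions overlap_words _
  unfold Spec_combine_transcriptions combine_transcriptions combine_transcriptions_alt
  match transcriptions with
  | [] => rfl
  | [t] => rfl
  | t :: t2 :: rest => simp [stepB_eq_stepA]
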